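-- pv_equiv track=rewrite | github.com/sky888galaxy/steam-spider | src/data_cleaner.py | detect_duplicates
-- ===== SOURCE A (Python) =====
-- def detect_duplicates(data_list):
--     """
--     检测重复数据
--     返回重复项的索引列表
--     """
--     seen_appids = {}
--     seen_titles = {}
--     duplicates = []
--
--     for i, row in enumerate(data_list):
--         appid = row.get('appid', '')
--         title = row.get('title', '')
--
--         # 检查appid重复
--         if appid and appid in seen_appids:
--             duplicates.append(i)
--         elif appid:
--             seen_appids[appid] = i
--
--         # 检查标题重复（可能是同一游戏的不同版本）
--         if title and title in seen_titles:
--             # 这里不直接标记为重复，而是记录相似度高的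
--             pass
--         elif title:
--             seen_titles[title] = i
--
--     return duplicates
-- ===== SOURCE B (Python) =====
-- def detect_duplicates(data_list):
--     pairs = [(row.get('appid', ''), i) for i, row in enumerate(data_list)
--              if row.get('appid', '')]
--     groups = {}
--     for k, i in pairs:
--         groups.setdefault(k, []).append(i)
--     dups = []
--     for g in groups.values():
--         dups.extend(g[1:])
--     return sorted(dups)
-- ===== Notes on version B (the rewrite author's own statement) =====
-- stated objective: alternative
-- what changed: Replaces the streaming seen-dict pass (emit index on repeat hit) with a build-index-then-extract shape: one pass groups indices by appid, then each group's tail is collected and sorted ascending; the dead title-tracking logic is dropped.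
import Mathlib
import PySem

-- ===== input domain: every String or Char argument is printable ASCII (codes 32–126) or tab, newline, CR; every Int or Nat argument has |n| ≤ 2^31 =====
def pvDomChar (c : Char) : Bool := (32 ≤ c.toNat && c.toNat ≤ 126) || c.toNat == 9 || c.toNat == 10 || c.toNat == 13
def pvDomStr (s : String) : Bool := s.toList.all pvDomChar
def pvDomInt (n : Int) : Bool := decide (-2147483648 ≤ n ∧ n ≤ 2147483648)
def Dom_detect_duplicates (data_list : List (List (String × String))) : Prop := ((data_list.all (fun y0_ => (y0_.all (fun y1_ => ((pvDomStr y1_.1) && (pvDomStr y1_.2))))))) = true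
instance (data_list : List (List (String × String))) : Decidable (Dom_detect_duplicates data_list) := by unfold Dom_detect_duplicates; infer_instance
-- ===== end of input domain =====

-- B replaces A's streaming seen-dict pass by a group-by-appid index whose group tails are
-- collected and sorted (objective: alternative; the dead title-tracking logic is dropped).

-- ===== PORT A =====
-- row.get('appid', '') / row.get('title', '') — first-match lookup in the association list
def pvKey (row : List (String × String)) : String := (PySem.Dict.mk row).getD "appid" ""
def pvTitle (row : List (String × String)) : String := (PySem.Dict.mk row).getD "title" ""

-- one iteration of A's loop: state = (seen_appids, seen_titles, duplicates), p = (i, row)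
def pvStepA (st : PySem.Dict String Int × PySem.Dict String Int × List Int)
    (p : Int × List (String × String)) :
    PySem.Dict String Int × PySem.Dict String Int × List Int :=
  let appid := pvKey p.2
  let title := pvTitle p.2
  let st1 :=
    if appid != "" && st.1.contains appid then (st.1, st.2.1, st.2.2 ++ [p.1])
    else if appid != "" then (st.1.insert appid p.1, st.2.1, st.2.2)
    else st
  if title != "" && st1.2.1.contains title then st1
  else if title != "" then (st1.1, st1.2.1.insert title p.1, st1.2.2)
  else st1

def detect_duplicates (data_list : List (List (String × String))) : List Int :=
  ((PySem.List.enumerate data_list 0).foldl pvStepA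
    (PySem.Dict.empty, PySem.Dict.empty, [])).2.2

-- ===== PORT B =====
def detect_duplicates_alt (data_list : List (List (String × String))) : List Int :=
  let pairs := (PySem.List.enumerate data_list 0).filterMap
      (fun p => if pvKey p.2 != "" then some (pvKey p.2, p.1) else none)
  let groups := pairs.foldl (fun d q => d.modify q.1 [] (· ++ [q.2])) PySem.Dict.empty
  let dups := groups.values.foldl (fun acc g => acc ++ PySem.List.slice g (some 1) none) []
  PySem.List.sorted dups (fun x => x) false

-- ===== PRECONDITION & SPEC =====
def Spec_detect_duplicates (data_list : List (List (String × String))) (out : List Int) : Prop := out = detect_duplicates_alt data_list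
instance (data_list : List (List (String × String))) (out : List Int) : Decidable (Spec_detect_duplicates data_list out) := by unfold Spec_detect_duplicates; infer_instance

-- ===== CLAIM (what is proved, stated in full; the proofs are below) =====
def Claim_equal_detect_duplicates : Prop := ∀ (data_list : List (List (String × String))), Dom_detect_duplicates data_list → Spec_detect_duplicates data_list (detect_duplicates data_list)

-- ===== LEMMAS AND PROOFS =====

-- reference loop: emit index s + j whenever the j-th key is nonempty and occurs among the
-- earlier keys (pre ++ already-processed keys)
def specLoop (pre : List String) (s : Int) : List String → List Int
  | [] => []
  | k :: ks => (if k != "" && pre.contains k then [s] else []) ++ specLoop (pre ++ [k]) (s + 1) ks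

-- the (appid, index) pairs B builds, over the key list
def gpairs (keys : List String) (s : Int) : List (String × Int) :=
  (PySem.List.enumerate keys s).filterMap (fun p => if p.2 != "" then some (p.2, p.1) else none)

-- B's duplicate indices before sorting, expressed over the key list
def gout (keys : List String) : List Int :=
  (PySem.Set.ofList ((gpairs keys 0).map (·.1))).flatMap
    (fun k => (((gpairs keys 0).filter (fun q => q.1 == k)).map (·.2)).tail)

theorem A_loop (dl : List (List (String × String))) :
    ∀ (sa stt : PySem.Dict String Int) (acc : List Int) (s : Int) (pre : List String),
    (∀ c : String, c ≠ "" → sa.contains c = pre.contains c) →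
    ((PySem.List.enumerate dl s).foldl pvStepA (sa, stt, acc)).2.2
      = acc ++ specLoop pre s (dl.map pvKey) := by
  induction dl with
  | nil => intro sa stt acc s pre h; simp [PySem.List.enumerate_nil, specLoop]
  | cons r rs ih =>
    intro sa stt acc s pre h
    rw [PySem.List.enumerate_cons, List.foldl_cons]
    simp only [List.map_cons, specLoop]
    by_cases hk : pvKey r = ""
    · have hst : pvStepA (sa, stt, acc) (s, r)
          = (sa, (if pvTitle r != "" && stt.contains (pvTitle r) then stt
                  else if pvTitle r != "" then stt.insert (pvTitle r) s else stt), acc) := by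
        simp [pvStepA, hk]; split_ifs <;> rfl
      rw [hst, ih _ _ _ _ (pre ++ [pvKey r]) ?_]
      · simp [hk]
      · intro c hc
        rw [h c hc]
        simp [hk]
        intro hce; exact absurd hce.symm (by simpa [hk] using hc)
    · by_cases hmem : sa.contains (pvKey r) = true
      · have hpre : pre.contains (pvKey r) = true := (h _ hk) ▸ hmem
        have hpre' : pvKey r ∈ pre := by simpa using hpre
        have hst : pvStepA (sa, stt, acc) (s, r)
            = (sa, (if pvTitle r != "" && stt.contains (pvTitle r) then stt
                    else if pvTitle r != "" then stt.insert (pvTitle r) s else stt), acc ++ [s]) := by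
          simp [pvStepA, hk, hmem]; split_ifs <;> rfl
        rw [hst, ih _ _ _ _ (pre ++ [pvKey r]) ?_]
        · simp [hk, hpre']
        · intro c hc
          rw [h c hc]
          simp
          intro hce; subst hce; simpa using hpre
      · have hpre : pre.contains (pvKey r) = false := by
          rw [← h _ hk]; simpa using hmem
        have hpre' : pvKey r ∉ pre := by simpa using hpre
        have hst : pvStepA (sa, stt, acc) (s, r)
            = (sa.insert (pvKey r) s,
               (if pvTitle r != "" && stt.contains (pvTitle r) then stt
                else if pvTitle r != "" then stt.insert (pvTitle r) s else stt), acc) := by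
          simp [pvStepA, hk, hmem]; split_ifs <;> rfl
        rw [hst, ih _ _ _ _ (pre ++ [pvKey r]) ?_]
        · simp [hpre']
        · intro c hc
          rw [PySem.Dict.contains_insert]
          rw [h c hc]
          simp
          by_cases hce : c = pvKey r <;> simp [hce]

-- enumerate of a mapped list
theorem enumerate_map {α β : Type} (f : α → β) (l : List α) (s : Int) :
    PySem.List.enumerate (l.map f) s = (PySem.List.enumerate l s).map (fun p => (p.1, f p.2)) := by
  induction l generalizing s with
  | nil => simp [PySem.List.enumerate_nil]
  | cons x xs ih => simp [PySem.List.enumerate_cons, ih]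

theorem gp_map_fst (keys : List String) (s : Int) :
    (gpairs keys s).map (·.1) = keys.filter (fun c => c != "") := by
  induction keys generalizing s with
  | nil => simp [gpairs, PySem.List.enumerate_nil]
  | cons k ks ih =>
    have h2 := ih (s + 1)
    simp only [gpairs] at h2 ⊢
    simp only [PySem.List.enumerate_cons, List.filterMap_cons, List.filter_cons]
    by_cases hk : k = "" <;> simp [hk] <;> simpa using h2

theorem gp_append (ks : List String) (k : String) (s : Int) :
    gpairs (ks ++ [k]) s = gpairs ks s ++ (if k != "" then [(k, s + ks.length)] else []) := by
  simp only [gpairs, PySem.List.enumerate_append, List.filterMap_append,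
    PySem.List.enumerate_cons, PySem.List.enumerate_nil, List.filterMap_cons, List.filterMap_nil]
  split_ifs <;> rfl

theorem spec_append (ks : List String) (k : String) :
    ∀ (pre : List String) (s : Int),
    specLoop pre s (ks ++ [k])
      = specLoop pre s ks ++ (if k != "" && (pre ++ ks).contains k then [s + ks.length] else []) := by
  induction ks with
  | nil => intro pre s; simp [specLoop]
  | cons a as ih =>
    intro pre s
    simp only [List.cons_append, specLoop, ih (pre ++ [a]) (s + 1)]
    have harith : s + 1 + (as.length : Int) = s + ((as.length : Int) + 1) := by ring
    simp [List.append_assoc, harith]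

theorem spec_lb (l : List String) :
    ∀ (pre : List String) (s : Int) (x : Int), x ∈ specLoop pre s l → s ≤ x := by
  induction l with
  | nil => intro pre s x hx; simp [specLoop] at hx
  | cons k ks ih =>
    intro pre s x hx
    simp only [specLoop, List.mem_append] at hx
    rcases hx with hx | hx
    · split at hx <;> simp at hx; omega
    · have := ih (pre ++ [k]) (s + 1) x hx; omega

theorem spec_pairwise (l : List String) :
    ∀ (pre : List String) (s : Int), (specLoop pre s l).Pairwise (· < ·) := by
  induction l with
  | nil => intro pre s; simp [specLoop]
  | cons k ks ih =>
    intro pre s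
    simp only [specLoop]
    refine List.pairwise_append.2 ⟨?_, ih _ _, ?_⟩
    · split <;> simp
    · intro a ha b hb
      have hb' := spec_lb ks (pre ++ [k]) (s + 1) b hb
      split at ha <;> simp at ha; omega

theorem flatMap_congr_mem {α β : Type} (T : List α) (f1 f2 : α → List β)
    (h : ∀ a ∈ T, f1 a = f2 a) : T.flatMap f1 = T.flatMap f2 := by
  induction T with
  | nil => simp
  | cons a T' ih =>
    simp only [List.flatMap_cons, h a (List.mem_cons_self), ih (fun b hb => h b (List.mem_cons_of_mem a hb))]

-- extending exactly one group (of a Nodup index) by [n] appends n to the flattened output, up to permutation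
theorem flatMap_point (S : List String) (g g' : String → List Int) (k : String) (n : Int)
    (hS : S.Nodup) (hk : k ∈ S) (hgk : g' k = g k ++ [n])
    (hother : ∀ c ∈ S, c ≠ k → g' c = g c) :
    (S.flatMap g').Perm (S.flatMap g ++ [n]) := by
  induction S with
  | nil => simp at hk
  | cons c S' ih =>
    simp only [List.flatMap_cons]
    have hnd := List.nodup_cons.1 hS
    rcases List.mem_cons.1 hk with hck | hkS
    · subst hck
      have hg' : S'.flatMap g' = S'.flatMap g :=
        flatMap_congr_mem _ _ _ (fun a ha => hother a (List.mem_cons_of_mem _ ha)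
          (fun h => hnd.1 (h ▸ ha)))
      rw [hg', hgk]
      simp only [List.append_assoc]
      exact List.Perm.append_left (g k) (List.perm_append_comm)
    · have hck : c ≠ k := fun h => hnd.1 (h ▸ hkS)
      rw [hother c (List.mem_cons_self) hck]
      simp only [List.append_assoc]
      exact List.Perm.append_left (g c)
        (ih hnd.2 hkS (fun a ha hak => hother a (List.mem_cons_of_mem _ ha) hak))

theorem ofList_append_singleton (xs : List String) (k : String) :
    PySem.Set.ofList (xs ++ [k])
      = if k ∈ xs then PySem.Set.ofList xs else PySem.Set.ofList xs ++ [k] := by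
  rw [PySem.Set.ofList_eq_foldl, List.foldl_append, ← PySem.Set.ofList_eq_foldl]
  simp only [List.foldl_cons, List.foldl_nil, PySem.Set.add, PySem.Set.contains]
  by_cases h : k ∈ xs
  · simp [h, PySem.Set.mem_ofList]
  · simp only [h, if_false]
    have : (PySem.Set.ofList xs).contains k = false := by
      simp [PySem.Set.contains, PySem.Set.mem_ofList, h]
    simp [PySem.Set.contains] at this
    simp [this]

theorem filter_key_eq_nil (pairs : List (String × Int)) (k : String)
    (h : k ∉ pairs.map (·.1)) : pairs.filter (fun q => q.1 == k) = [] := by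
  rw [List.filter_eq_nil_iff]
  intro q hq hqk
  exact h (List.mem_map.2 ⟨q, hq, by simpa using hqk⟩)

theorem filter_key_ne_nil (pairs : List (String × Int)) (k : String)
    (h : k ∈ pairs.map (·.1)) : (pairs.filter (fun q => q.1 == k)).map (·.2) ≠ [] := by
  rcases List.mem_map.1 h with ⟨q, hq, hqk⟩
  have : q ∈ pairs.filter (fun q => q.1 == k) := List.mem_filter.2 ⟨hq, by simpa using hqk⟩
  intro hnil
  rw [List.map_eq_nil_iff.1 hnil] at this
  exact absurd this List.not_mem_nil

theorem gout_append (ks : List String) (k : String) :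
    (gout (ks ++ [k])).Perm
      (gout ks ++ (if k != "" && ks.contains k then [(ks.length : Int)] else [])) := by
  by_cases hk : k = ""
  · simp [gout, gp_append, hk]
  · have hfst := gp_map_fst ks 0
    have hpairs' : gpairs (ks ++ [k]) 0 = gpairs ks 0 ++ [(k, (ks.length : Int))] := by
      rw [gp_append]; simp [hk]
    by_cases hmem : k ∈ (gpairs ks 0).map (·.1)
    · -- k already seen among nonempty keys
      have hkks : k ∈ ks := by
        rw [hfst] at hmem; exact (List.mem_filter.1 hmem).1
      have hS : (PySem.Set.ofList ((gpairs ks 0).map (·.1))).Nodup := PySem.Set.nodup_ofList _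
      have hkS : k ∈ PySem.Set.ofList ((gpairs ks 0).map (·.1)) :=
        (PySem.Set.mem_ofList _ _).2 hmem
      have hSets : PySem.Set.ofList ((gpairs (ks ++ [k]) 0).map (·.1))
          = PySem.Set.ofList ((gpairs ks 0).map (·.1)) := by
        rw [hpairs']
        simp only [List.map_append, List.map_cons, List.map_nil]
        rw [ofList_append_singleton]
        simp [hmem]
      have hcond : (k != "" && ks.contains k) = true := by
        simp [hk, hkks]
      rw [hcond, if_pos rfl]
      unfold gout
      rw [hSets, hpairs']
      apply flatMap_point _ _ _ k ((ks.length : Int)) hS hkS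
      · rw [List.filter_append]
        simp only [List.filter_cons, List.filter_nil]
        rw [if_pos (by simp)]
        rw [List.map_append, List.tail_append]
        have hE : ((List.filter (fun q => q.1 == k) (gpairs ks 0)).map (·.2)).isEmpty = false := by
          rw [List.isEmpty_eq_false_iff]
          exact filter_key_ne_nil _ _ hmem
        simp [hE]
      · intro c _ hck
        rw [List.filter_append]
        simp only [List.filter_cons, List.filter_nil]
        rw [if_neg (by simpa using hck.symm)]
        simp
    · -- k fresh among nonempty keys
      have hkks : k ∉ ks := by
        intro hin
        exact hmem (hfst ▸ List.mem_filter.2 ⟨hin, by simp [hk]⟩)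
      have hcond : (k != "" && ks.contains k) = false := by
        simp [hkks]
      rw [hcond]
      simp only [Bool.false_eq_true, if_false, List.append_nil]
      have hSets : PySem.Set.ofList ((gpairs (ks ++ [k]) 0).map (·.1))
          = PySem.Set.ofList ((gpairs ks 0).map (·.1)) ++ [k] := by
        rw [hpairs']
        simp only [List.map_append, List.map_cons, List.map_nil]
        rw [ofList_append_singleton]
        simp [hmem]
      unfold gout
      rw [hSets, hpairs', List.flatMap_append]
      have hg'k : ((List.filter (fun q => q.1 == k) (gpairs ks 0 ++ [(k, (ks.length : Int))])).map (·.2)).tail = [] := by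
        rw [List.filter_append, filter_key_eq_nil _ _ hmem]
        simp
      rw [List.flatMap_singleton, hg'k, List.append_nil]
      have hrest : ∀ c ∈ PySem.Set.ofList ((gpairs ks 0).map (·.1)),
          ((List.filter (fun q => q.1 == c) (gpairs ks 0 ++ [(k, (ks.length : Int))])).map (·.2)).tail
          = ((List.filter (fun q => q.1 == c) (gpairs ks 0)).map (·.2)).tail := by
        intro c hc
        have hck : c ≠ k := by
          intro h; subst h; exact hmem ((PySem.Set.mem_ofList _ _).1 hc)
        rw [List.filter_append]
        simp only [List.filter_cons, List.filter_nil]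
        rw [if_neg (by simpa using fun h => hck h.symm)]
        simp
      rw [flatMap_congr_mem _ _ _ hrest]

theorem gout_perm (keys : List String) : (gout keys).Perm (specLoop [] 0 keys) := by
  induction keys using List.reverseRecOn with
  | nil => simp [gout, gpairs, PySem.List.enumerate_nil, specLoop, PySem.Set.ofList]
  | append_singleton ks k ih =>
    refine (gout_append ks k).trans ?_
    rw [spec_append]
    simp only [List.nil_append, zero_add]
    exact ih.append_right _

theorem alt_eq (dl : List (List (String × String))) :
    detect_duplicates_alt dl = PySem.List.sorted (gout (dl.map pvKey)) (fun x => x) false := by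
  have hpairs : (PySem.List.enumerate dl 0).filterMap
      (fun p => if pvKey p.2 != "" then some (pvKey p.2, p.1) else none)
      = gpairs (dl.map pvKey) 0 := by
    rw [gpairs, enumerate_map, List.filterMap_map]
    rfl
  have hnd : ∀ (pairs : List (String × Int)),
      (pairs.foldl (fun d q => d.modify q.1 [] (· ++ [q.2])) PySem.Dict.empty).keys.Nodup :=
    fun pairs => PySem.Dict.nodup_keys_foldl_modify_key pairs (·.1) [] (fun d q => (· ++ [q.2]))
      PySem.Dict.empty (by simp [PySem.Dict.keys_empty])
  have hdups : ∀ (pairs : List (String × Int)),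
      ((pairs.foldl (fun d q => d.modify q.1 [] (· ++ [q.2])) PySem.Dict.empty).values.foldl
          (fun acc g => acc ++ PySem.List.slice g (some 1) none) [])
        = (PySem.Set.ofList (pairs.map (·.1))).flatMap
            (fun k => ((pairs.filter (fun q => q.1 == k)).map (·.2)).tail) := by
    intro pairs
    set groups := pairs.foldl (fun d q => d.modify q.1 [] (· ++ [q.2])) PySem.Dict.empty with hg
    have hkeys : groups.keys = PySem.Set.ofList (pairs.map (·.1)) := by
      rw [hg, PySem.Dict.keys_foldl_modify_key pairs (·.1) [] (fun d q => (· ++ [q.2])) PySem.Dict.empty,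
        PySem.Dict.keys_empty, PySem.Set.update, ← PySem.Set.ofList_eq_foldl]
    have hgd : ∀ c, groups.getD c [] = (pairs.filter (fun q => q.1 == c)).map (·.2) := by
      intro c
      rw [hg, PySem.Dict.getD_foldl_modify_append pairs PySem.Dict.empty c, PySem.Dict.getD_empty]
      simp
    rw [PySem.List.foldl_append_eq_flatMap (fun g => PySem.List.slice g (some 1) none)
      groups.values []]
    simp only [List.nil_append, PySem.List.slice_from_one]
    have hvals : groups.values = groups.items.map (·.2) := rfl
    have hkeys' : groups.keys = groups.items.map (·.1) := rfl
    rw [hvals, List.flatMap_map]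
    have hstep : groups.items.flatMap (fun p => p.2.tail)
        = groups.items.flatMap (fun p => (groups.getD p.1 []).tail) := by
      refine (flatMap_congr_mem _ _ _ ?_).symm
      intro p hp
      rw [PySem.Dict.getD_of_mem_items groups (by rw [← Prod.mk.eta (p := p)] at hp; exact hp) (hnd pairs)]
    rw [hstep]
    have h2 : groups.items.flatMap (fun p => (groups.getD p.1 []).tail)
        = (groups.items.map (·.1)).flatMap (fun k => (groups.getD k []).tail) := by
      rw [List.flatMap_map]
    rw [h2, ← hkeys', hkeys]
    refine flatMap_congr_mem _ _ _ ?_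
    intro c _
    rw [hgd]
  simp only [detect_duplicates_alt, hpairs, hdups]
  rfl

-- ===== VERDICT (by name: the statement is the Claim_ definition above) =====
theorem detect_duplicates_spec : Claim_equal_detect_duplicates := by
  intro dl _
  show detect_duplicates dl = detect_duplicates_alt dl
  rw [alt_eq]
  unfold detect_duplicates
  rw [A_loop dl PySem.Dict.empty PySem.Dict.empty [] 0 []
    (fun c _ => by simp [PySem.Dict.contains_empty])]
  rw [List.nil_append]
  exact (PySem.List.sorted_eq_of_perm_of_pairwise_lt _ _ _
    ((gout_perm _).symm) (spec_pairwise _ _ _)).symm
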